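-- pv_equiv track=rewrite | github.com/myao9494/Local-fulltext-search | backend/app/extractors/text_extractor.py | _read_json_fragment
-- ===== SOURCE A (Python) =====
-- def _read_json_fragment(content: str, start_index: int) -> tuple[str | None, int]:
--     """
--     開始位置から JSON らしい波括弧/角括弧ブロックを切り出す。
--     """
--     opening = content[start_index]
--     closing = "}" if opening == "{" else "]"
--     stack = [closing]
--     index = start_index + 1
--     in_string = False
--     is_escaped = False
--
--     while index < len(content):
--         char = content[index]
--         if in_string:
--             if is_escaped:
--                 is_escaped = False
--             elif char == "\\":
--                 is_escaped = True
--             elif char == '"':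
--                 in_string = False
--             index += 1
--             continue
--
--         if char == '"':
--             in_string = True
--             index += 1
--             continue
--         if char == "{":
--             stack.append("}")
--             index += 1
--             continue
--         if char == "[":
--             stack.append("]")
--             index += 1
--             continue
--         if stack and char == stack[-1]:
--             stack.pop()
--             index += 1
--             if not stack:
--                 return content[start_index:index], index
--             continue
--         index += 1
--
--     return None, start_index
-- ===== SOURCE B (Python) =====
-- def _read_json_fragment(content: str, start_index: int) -> tuple:
--     """Recursive-descent rewrite: the call stack replaces the explicit closer stack."""
--     opening = content[start_index]
--     expected = "}" if opening == "{" else "]"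
--     n = len(content)
--
--     def skip_string(i):
--         # consume chars of a string literal; return index just after the closing quote
--         while i < n:
--             c = content[i]
--             if c == "\\":
--                 i += 2
--             elif c == '"':
--                 return i + 1
--             else:
--                 i += 1
--         return i
--
--     def scan(i, closer):
--         # scan forward for `closer`, recursing on nested brackets; None = ran off the end
--         while i < n:
--             c = content[i]
--             if c == '"':
--                 i = skip_string(i + 1)
--             elif c == "{":
--                 j = scan(i + 1, "}")
--                 if j is None:
--                     return None
--                 i = j
--             elif c == "[":
--                 j = scan(i + 1, "]")
--                 if j is None:
--                     return None
--                 i = j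
--             elif c == closer:
--                 return i + 1
--             else:
--                 i += 1
--         return None
--
--     j = scan(start_index + 1, expected)
--     if j is None:
--         return None, start_index
--     return content[start_index:j], j
-- ===== Notes on version B (the rewrite author's own statement) =====
-- stated objective: alternative
-- what changed: Replaces A's explicit closer stack and in_string/is_escaped loop flags by recursive descent: a string-skipping helper and a scanner that recurses on nested '{'/'[' with the call stack holding the expected closers.
import Mathlib
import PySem

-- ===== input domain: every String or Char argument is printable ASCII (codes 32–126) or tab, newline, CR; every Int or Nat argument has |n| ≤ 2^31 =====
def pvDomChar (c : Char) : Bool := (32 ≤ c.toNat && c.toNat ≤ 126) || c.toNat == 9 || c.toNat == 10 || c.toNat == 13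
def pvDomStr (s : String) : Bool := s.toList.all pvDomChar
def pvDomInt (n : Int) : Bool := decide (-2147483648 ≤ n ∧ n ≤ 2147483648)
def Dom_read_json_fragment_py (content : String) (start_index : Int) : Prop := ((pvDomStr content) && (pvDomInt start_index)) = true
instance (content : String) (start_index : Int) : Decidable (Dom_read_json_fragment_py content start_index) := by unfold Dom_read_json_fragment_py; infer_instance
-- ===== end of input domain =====

-- B replaces A's explicit closer stack and in_string/is_escaped loop flags by recursive
-- descent: a string-skipping helper plus a scanner that recurses on nested brackets;
-- objective: alternative decomposition, same cost.
-- (The Nat `fuel` argument of each loop is only a totality device; it is called with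
-- enough fuel that the 0 case — which coincides with the loop-exhausted value — is
-- never reached on inputs satisfying Pre_.)

-- ===== PORT A =====
-- A's while loop over (index, stack, in_string, is_escaped); stack top = list head.
def pvLoopA (content : String) (cs : List Char) (start_index : Int) :
    Nat → Int → List Char → Bool → Bool → Option String × Int
  | 0, _, _, _, _ => (none, start_index)
  | fuel + 1, index, stack, in_string, is_escaped =>
    if index < (cs.length : Int) then
      match PySem.List.pyGet? cs index with
      | none => (none, start_index)   -- unreachable when start_index is in range (Python would raise)
      | some ch =>
        match in_string with
        | true =>
          match is_escaped with
          | true => pvLoopA content cs start_index fuel (index + 1) stack true false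
          | false =>
            if ch = '\\' then pvLoopA content cs start_index fuel (index + 1) stack true true
            else if ch = '"' then pvLoopA content cs start_index fuel (index + 1) stack false false
            else pvLoopA content cs start_index fuel (index + 1) stack true false
        | false =>
          if ch = '"' then pvLoopA content cs start_index fuel (index + 1) stack true false
          else if ch = '{' then pvLoopA content cs start_index fuel (index + 1) ('}' :: stack) false false
          else if ch = '[' then pvLoopA content cs start_index fuel (index + 1) (']' :: stack) false false
          else
            match stack with
            | top :: rest =>
              if ch = top then
                if rest = [] then
                  (some (PySem.Str.slice content (some start_index) (some (index + 1))), index + 1)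
                else pvLoopA content cs start_index fuel (index + 1) rest false false
              else pvLoopA content cs start_index fuel (index + 1) (top :: rest) false false
            | [] => pvLoopA content cs start_index fuel (index + 1) [] false false
    else (none, start_index)

def read_json_fragment_py (content : String) (start_index : Int) : Option String × Int :=
  match PySem.List.pyGet? content.toList start_index with
  | none => (none, start_index)   -- Python raises IndexError here; excluded by Pre_
  | some opening =>
    let closing : Char := if opening = '{' then '}' else ']'
    pvLoopA content content.toList start_index (2 * content.toList.length)
      (start_index + 1) [closing] false false

-- ===== PORT B =====
-- Source B's skip_string: consume a string literal, return the index just after the closing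
-- quote (none = the unreachable would-raise lookup, as in pvLoopA; the subtype bound
-- records that the index never moves backwards).
def pvSkipStrB (cs : List Char) : Nat → (i : Int) → Option {j : Int // i ≤ j}
  | 0, i => some ⟨i, le_refl i⟩
  | fuel + 1, i =>
    if i < (cs.length : Int) then
      match PySem.List.pyGet? cs i with
      | none => none
      | some c =>
        if c = '\\' then
          match pvSkipStrB cs fuel (i + 2) with
          | none => none
          | some ⟨j, hj⟩ => some ⟨j, by omega⟩
        else if c = '"' then some ⟨i + 1, by omega⟩
        else
          match pvSkipStrB cs fuel (i + 1) with
          | none => none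
          | some ⟨j, hj⟩ => some ⟨j, by omega⟩
    else some ⟨i, le_refl i⟩

-- Source B's scan: look for `closer` from index i, recursing on nested '{' / '['.
def pvScanB (cs : List Char) (closer : Char) : Nat → (i : Int) → Option {j : Int // i < j}
  | 0, _ => none
  | fuel + 1, i =>
    if i < (cs.length : Int) then
      match PySem.List.pyGet? cs i with
      | none => none
      | some c =>
        if c = '"' then
          match pvSkipStrB cs fuel (i + 1) with
          | none => none
          | some ⟨j, hj⟩ =>
            match pvScanB cs closer fuel j with
            | none => none
            | some ⟨k, hk⟩ => some ⟨k, by omega⟩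
        else if c = '{' then
          match pvScanB cs '}' fuel (i + 1) with
          | none => none
          | some ⟨j, hj⟩ =>
            match pvScanB cs closer fuel j with
            | none => none
            | some ⟨k, hk⟩ => some ⟨k, by omega⟩
        else if c = '[' then
          match pvScanB cs ']' fuel (i + 1) with
          | none => none
          | some ⟨j, hj⟩ =>
            match pvScanB cs closer fuel j with
            | none => none
            | some ⟨k, hk⟩ => some ⟨k, by omega⟩
        else if c = closer then some ⟨i + 1, by omega⟩
        else
          match pvScanB cs closer fuel (i + 1) with
          | none => none
          | some ⟨j, hj⟩ => some ⟨j, by omega⟩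
    else none

def read_json_fragment_py_alt (content : String) (start_index : Int) : Option String × Int :=
  match PySem.List.pyGet? content.toList start_index with
  | none => (none, start_index)   -- Python raises IndexError here; excluded by Pre_
  | some opening =>
    let expected : Char := if opening = '{' then '}' else ']'
    match pvScanB content.toList expected (2 * content.toList.length) (start_index + 1) with
    | none => (none, start_index)
    | some ⟨j, _⟩ => (some (PySem.Str.slice content (some start_index) (some j)), j)

-- ===== PRECONDITION & SPEC =====
-- Pre_ excludes only the inputs where A raises IndexError: start_index out of range for content.
def Pre_read_json_fragment_py (content : String) (start_index : Int) : Prop :=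
  PySem.Raise.InRange content.toList.length start_index
instance (content : String) (start_index : Int) : Decidable (Pre_read_json_fragment_py content start_index) := by unfold Pre_read_json_fragment_py; infer_instance

def pvWitness_read_json_fragment_py : String × Int := ("x {\"a\": [1, 2]} y", 2)

def Spec_read_json_fragment_py (content : String) (start_index : Int) (out : Option String × Int) : Prop := out = read_json_fragment_py_alt content start_index
instance (content : String) (start_index : Int) (out : Option String × Int) : Decidable (Spec_read_json_fragment_py content start_index out) := by unfold Spec_read_json_fragment_py; infer_instance

-- ===== CLAIM (what is proved, stated in full; the proofs are below) =====
def Claim_equal_read_json_fragment_py : Prop := ∀ (content : String) (start_index : Int), Dom_read_json_fragment_py content start_index → Pre_read_json_fragment_py content start_index → Spec_read_json_fragment_py content start_index (read_json_fragment_py content start_index)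

-- ===== LEMMAS AND PROOFS =====

-- In range, the lookup succeeds.
theorem pv_get_some (cs : List Char) (i : Int) (h0 : -(cs.length : Int) ≤ i)
    (h1 : i < (cs.length : Int)) : ∃ c, PySem.List.pyGet? cs i = some c := by
  cases hg : PySem.List.pyGet? cs i with
  | none =>
    rw [PySem.List.pyGet?_eq_none_iff] at hg
    exact absurd ⟨h0, h1⟩ hg
  | some c => exact ⟨c, rfl⟩

-- One-step unfoldings of the three loops.
theorem pv_loopA_end (content : String) (cs : List Char) (s : Int) (f : Nat) (i : Int)
    (stack : List Char) (ins esc : Bool) (h : ¬ i < (cs.length : Int)) :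
    pvLoopA content cs s f i stack ins esc = (none, s) := by
  cases f with
  | zero => rfl
  | succ f => rw [pvLoopA, if_neg h]

theorem pv_loopA_esc (content : String) (cs : List Char) (s : Int) (f : Nat) (i : Int)
    (stack : List Char) (h : i < (cs.length : Int)) (c : Char)
    (hc : PySem.List.pyGet? cs i = some c) :
    pvLoopA content cs s (f + 1) i stack true true =
      pvLoopA content cs s f (i + 1) stack true false := by
  rw [pvLoopA, if_pos h, hc]

theorem pv_loopA_str (content : String) (cs : List Char) (s : Int) (f : Nat) (i : Int)
    (stack : List Char) (h : i < (cs.length : Int)) (c : Char)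
    (hc : PySem.List.pyGet? cs i = some c) :
    pvLoopA content cs s (f + 1) i stack true false =
      (if c = '\\' then pvLoopA content cs s f (i + 1) stack true true
       else if c = '"' then pvLoopA content cs s f (i + 1) stack false false
       else pvLoopA content cs s f (i + 1) stack true false) := by
  rw [pvLoopA, if_pos h, hc]

theorem pv_loopA_scan (content : String) (cs : List Char) (s : Int) (f : Nat) (i : Int)
    (top : Char) (rest : List Char) (esc : Bool) (h : i < (cs.length : Int)) (c : Char)
    (hc : PySem.List.pyGet? cs i = some c) :
    pvLoopA content cs s (f + 1) i (top :: rest) false esc =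
      (if c = '"' then pvLoopA content cs s f (i + 1) (top :: rest) true false
       else if c = '{' then pvLoopA content cs s f (i + 1) ('}' :: top :: rest) false false
       else if c = '[' then pvLoopA content cs s f (i + 1) (']' :: top :: rest) false false
       else if c = top then
         if rest = [] then
           (some (PySem.Str.slice content (some s) (some (i + 1))), i + 1)
         else pvLoopA content cs s f (i + 1) rest false false
       else pvLoopA content cs s f (i + 1) (top :: rest) false false) := by
  rw [pvLoopA, if_pos h, hc]

theorem pv_loopA_nil (content : String) (cs : List Char) (s : Int) (f : Nat) (i : Int)
    (esc : Bool) (h : i < (cs.length : Int)) (c : Char)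
    (hc : PySem.List.pyGet? cs i = some c) :
    pvLoopA content cs s (f + 1) i [] false esc =
      (if c = '"' then pvLoopA content cs s f (i + 1) [] true false
       else if c = '{' then pvLoopA content cs s f (i + 1) ['}'] false false
       else if c = '[' then pvLoopA content cs s f (i + 1) [']'] false false
       else pvLoopA content cs s f (i + 1) [] false false) := by
  rw [pvLoopA, if_pos h, hc]

theorem pv_skipB_end (cs : List Char) (f : Nat) (i : Int) (h : ¬ i < (cs.length : Int)) :
    pvSkipStrB cs f i = some ⟨i, le_refl i⟩ := by
  cases f with
  | zero => rfl
  | succ f => rw [pvSkipStrB, if_neg h]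

theorem pv_skipB_step (cs : List Char) (f : Nat) (i : Int) (h : i < (cs.length : Int))
    (c : Char) (hc : PySem.List.pyGet? cs i = some c) :
    pvSkipStrB cs (f + 1) i =
      (if c = '\\' then
        match pvSkipStrB cs f (i + 2) with
        | none => none
        | some ⟨j, hj⟩ => some ⟨j, by omega⟩
      else if c = '"' then some ⟨i + 1, by omega⟩
      else
        match pvSkipStrB cs f (i + 1) with
        | none => none
        | some ⟨j, hj⟩ => some ⟨j, by omega⟩) := by
  rw [pvSkipStrB, if_pos h, hc]

theorem pv_scanB_end (cs : List Char) (closer : Char) (f : Nat) (i : Int)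
    (h : ¬ i < (cs.length : Int)) : pvScanB cs closer f i = none := by
  cases f with
  | zero => rfl
  | succ f => rw [pvScanB, if_neg h]

theorem pv_scanB_step (cs : List Char) (closer : Char) (f : Nat) (i : Int)
    (h : i < (cs.length : Int)) (c : Char) (hc : PySem.List.pyGet? cs i = some c) :
    pvScanB cs closer (f + 1) i =
      (if c = '"' then
        match pvSkipStrB cs f (i + 1) with
        | none => none
        | some ⟨j, hj⟩ =>
          match pvScanB cs closer f j with
          | none => none
          | some ⟨k, hk⟩ => some ⟨k, by omega⟩
      else if c = '{' then
        match pvScanB cs '}' f (i + 1) with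
        | none => none
        | some ⟨j, hj⟩ =>
          match pvScanB cs closer f j with
          | none => none
          | some ⟨k, hk⟩ => some ⟨k, by omega⟩
      else if c = '[' then
        match pvScanB cs ']' f (i + 1) with
        | none => none
        | some ⟨j, hj⟩ =>
          match pvScanB cs closer f j with
          | none => none
          | some ⟨k, hk⟩ => some ⟨k, by omega⟩
      else if c = closer then some ⟨i + 1, by omega⟩
      else
        match pvScanB cs closer f (i + 1) with
        | none => none
        | some ⟨j, hj⟩ => some ⟨j, by omega⟩) := by
  rw [pvScanB, if_pos h, hc]

-- A's escaped state just consumes one character.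
theorem pv_esc_step (content : String) (cs : List Char) (s : Int) (f : Nat) (i : Int)
    (stack : List Char) (h0 : -(cs.length : Int) ≤ i) :
    pvLoopA content cs s (f + 1) i stack true true =
      pvLoopA content cs s f (i + 1) stack true false := by
  by_cases h : i < (cs.length : Int)
  · obtain ⟨c, hc⟩ := pv_get_some cs i h0 h
    exact pv_loopA_esc content cs s f i stack h c hc
  · rw [pv_loopA_end content cs s (f + 1) i stack true true h,
        pv_loopA_end content cs s f (i + 1) stack true false (by omega)]

-- The result does not depend on the fuel once the fuel covers the remaining length.
theorem pv_loopA_fuel (content : String) (cs : List Char) (s : Int) :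
    ∀ (n fa fb : Nat) (i : Int) (stack : List Char) (ins esc : Bool),
      ((cs.length : Int) - i).toNat ≤ n →
      ((cs.length : Int) - i).toNat ≤ fa → ((cs.length : Int) - i).toNat ≤ fb →
      -(cs.length : Int) ≤ i →
      pvLoopA content cs s fa i stack ins esc = pvLoopA content cs s fb i stack ins esc := by
  intro n
  induction n with
  | zero =>
    intro fa fb i stack ins esc hn hfa hfb h0
    have h : ¬ i < (cs.length : Int) := by omega
    rw [pv_loopA_end content cs s fa i stack ins esc h,
        pv_loopA_end content cs s fb i stack ins esc h]
  | succ m ih =>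
    intro fa fb i stack ins esc hn hfa hfb h0
    by_cases h : i < (cs.length : Int)
    · obtain ⟨fa', rfl⟩ : ∃ k, fa = k + 1 := ⟨fa - 1, by omega⟩
      obtain ⟨fb', rfl⟩ : ∃ k, fb = k + 1 := ⟨fb - 1, by omega⟩
      obtain ⟨c, hc⟩ := pv_get_some cs i h0 h
      cases ins with
      | true =>
        cases esc with
        | true =>
          rw [pv_loopA_esc content cs s fa' i stack h c hc,
              pv_loopA_esc content cs s fb' i stack h c hc]
          exact ih fa' fb' (i + 1) stack true false (by omega) (by omega) (by omega) (by omega)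
        | false =>
          rw [pv_loopA_str content cs s fa' i stack h c hc,
              pv_loopA_str content cs s fb' i stack h c hc]
          split_ifs <;>
            exact ih fa' fb' (i + 1) _ _ _ (by omega) (by omega) (by omega) (by omega)
      | false =>
        cases stack with
        | nil =>
          rw [pv_loopA_nil content cs s fa' i esc h c hc,
              pv_loopA_nil content cs s fb' i esc h c hc]
          split_ifs <;>
            exact ih fa' fb' (i + 1) _ _ _ (by omega) (by omega) (by omega) (by omega)
        | cons top rest =>
          rw [pv_loopA_scan content cs s fa' i top rest esc h c hc,
              pv_loopA_scan content cs s fb' i top rest esc h c hc]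
          split_ifs <;>
            first
            | rfl
            | exact ih fa' fb' (i + 1) _ _ _ (by omega) (by omega) (by omega) (by omega)
    · rw [pv_loopA_end content cs s fa i stack ins esc h,
          pv_loopA_end content cs s fb i stack ins esc h]

-- A's in-string scanning agrees with B's skip_string.
theorem pv_skip_agree (content : String) (cs : List Char) (s : Int) :
    ∀ (n fa fb fc : Nat) (i : Int) (stack : List Char),
      ((cs.length : Int) - i).toNat ≤ n →
      ((cs.length : Int) - i).toNat ≤ fa → ((cs.length : Int) - i).toNat ≤ fb →
      ((cs.length : Int) - i).toNat ≤ fc → -(cs.length : Int) ≤ i →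
      pvLoopA content cs s fa i stack true false =
        (match pvSkipStrB cs fb i with
         | none => (none, s)
         | some ⟨j, _⟩ => pvLoopA content cs s fc j stack false false) := by
  intro n
  induction n with
  | zero =>
    intro fa fb fc i stack hn hfa hfb hfc h0
    have h : ¬ i < (cs.length : Int) := by omega
    rw [pv_loopA_end content cs s fa i stack true false h, pv_skipB_end cs fb i h]
    exact (pv_loopA_end content cs s fc i stack false false h).symm
  | succ m ih =>
    intro fa fb fc i stack hn hfa hfb hfc h0
    by_cases h : i < (cs.length : Int)
    · obtain ⟨fa', rfl⟩ : ∃ k, fa = k + 1 := ⟨fa - 1, by omega⟩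
      obtain ⟨fb', rfl⟩ : ∃ k, fb = k + 1 := ⟨fb - 1, by omega⟩
      obtain ⟨c, hc⟩ := pv_get_some cs i h0 h
      rw [pv_loopA_str content cs s fa' i stack h c hc, pv_skipB_step cs fb' i h c hc]
      by_cases hb : c = '\\'
      · simp only [if_pos hb]
        by_cases h1 : i + 1 < (cs.length : Int)
        · obtain ⟨fa'', rfl⟩ : ∃ k, fa' = k + 1 := ⟨fa' - 1, by omega⟩
          rw [pv_esc_step content cs s fa'' (i + 1) stack (by omega)]
          have e2 : i + 1 + 1 = i + 2 := by ring
          rw [e2, ih fa'' fb' fc (i + 2) stack (by omega) (by omega) (by omega) (by omega) (by omega)]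
          cases pvSkipStrB cs fb' (i + 2) with
          | none => rfl
          | some j => rcases j with ⟨j, hj⟩; rfl
        · rw [pv_loopA_end content cs s fa' (i + 1) stack true true h1]
          rw [pv_skipB_end cs fb' (i + 2) (by omega)]
          exact (pv_loopA_end content cs s fc (i + 2) stack false false (by omega)).symm
      · simp only [if_neg hb]
        by_cases hq : c = '"'
        · simp only [if_pos hq]
          exact pv_loopA_fuel content cs s m fa' fc (i + 1) stack false false
            (by omega) (by omega) (by omega) (by omega)
        · simp only [if_neg hq]
          rw [ih fa' fb' fc (i + 1) stack (by omega) (by omega) (by omega) (by omega) (by omega)]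
          cases pvSkipStrB cs fb' (i + 1) with
          | none => rfl
          | some j => rcases j with ⟨j, hj⟩; rfl
    · rw [pv_loopA_end content cs s fa i stack true false h, pv_skipB_end cs fb i h]
      exact (pv_loopA_end content cs s fc i stack false false h).symm

-- Main invariant: A's loop with stack (c :: rest) behaves like B's scan for c,
-- followed by A's loop on the remaining stack.
theorem pv_main_agree (content : String) (cs : List Char) (s : Int) :
    ∀ (n fa fb fc : Nat) (i : Int) (c : Char) (rest : List Char),
      ((cs.length : Int) - i).toNat ≤ n →
      ((cs.length : Int) - i).toNat ≤ fa → ((cs.length : Int) - i).toNat ≤ fb →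
      ((cs.length : Int) - i).toNat ≤ fc → -(cs.length : Int) ≤ i →
      pvLoopA content cs s fa i (c :: rest) false false =
        (match pvScanB cs c fb i with
         | none => (none, s)
         | some ⟨j, _⟩ =>
           if rest = [] then (some (PySem.Str.slice content (some s) (some j)), j)
           else pvLoopA content cs s fc j rest false false) := by
  intro n
  induction n with
  | zero =>
    intro fa fb fc i c rest hn hfa hfb hfc h0
    have h : ¬ i < (cs.length : Int) := by omega
    rw [pv_loopA_end content cs s fa i (c :: rest) false false h, pv_scanB_end cs c fb i h]
  | succ m ih =>
    intro fa fb fc i c rest hn hfa hfb hfc h0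
    by_cases h : i < (cs.length : Int)
    · obtain ⟨fa', rfl⟩ : ∃ k, fa = k + 1 := ⟨fa - 1, by omega⟩
      obtain ⟨fb', rfl⟩ : ∃ k, fb = k + 1 := ⟨fb - 1, by omega⟩
      obtain ⟨ch, hc⟩ := pv_get_some cs i h0 h
      rw [pv_loopA_scan content cs s fa' i c rest false h ch hc, pv_scanB_step cs c fb' i h ch hc]
      by_cases hq : ch = '"'
      · simp only [if_pos hq]
        rw [pv_skip_agree content cs s m fa' fb' fa' (i + 1) (c :: rest)
            (by omega) (by omega) (by omega) (by omega) (by omega)]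
        cases pvSkipStrB cs fb' (i + 1) with
        | none => rfl
        | some j =>
          rcases j with ⟨j, hj⟩
          simp only
          rw [ih fa' fb' fc j c rest (by omega) (by omega) (by omega) (by omega) (by omega)]
          cases pvScanB cs c fb' j with
          | none => rfl
          | some k => rcases k with ⟨k, hk⟩; rfl
      · simp only [if_neg hq]
        by_cases ho : ch = '{'
        · simp only [if_pos ho]
          rw [ih fa' fb' fa' (i + 1) '}' (c :: rest) (by omega) (by omega) (by omega) (by omega) (by omega)]
          cases pvScanB cs '}' fb' (i + 1) with
          | none => rfl
          | some j =>
            rcases j with ⟨j, hj⟩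
            simp only [reduceCtorEq, if_false]
            rw [ih fa' fb' fc j c rest (by omega) (by omega) (by omega) (by omega) (by omega)]
            cases pvScanB cs c fb' j with
            | none => rfl
            | some k => rcases k with ⟨k, hk⟩; rfl
        · simp only [if_neg ho]
          by_cases hs : ch = '['
          · simp only [if_pos hs]
            rw [ih fa' fb' fa' (i + 1) ']' (c :: rest) (by omega) (by omega) (by omega) (by omega) (by omega)]
            cases pvScanB cs ']' fb' (i + 1) with
            | none => rfl
            | some j =>
              rcases j with ⟨j, hj⟩
              simp only [reduceCtorEq, if_false]
              rw [ih fa' fb' fc j c rest (by omega) (by omega) (by omega) (by omega) (by omega)]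
              cases pvScanB cs c fb' j with
              | none => rfl
              | some k => rcases k with ⟨k, hk⟩; rfl
          · simp only [if_neg hs]
            by_cases hcl : ch = c
            · simp only [if_pos hcl]
              by_cases hr : rest = []
              · simp only [if_pos hr]
              · simp only [if_neg hr]
                exact pv_loopA_fuel content cs s m fa' fc (i + 1) rest false false
                  (by omega) (by omega) (by omega) (by omega)
            · simp only [if_neg hcl]
              rw [ih fa' fb' fc (i + 1) c rest (by omega) (by omega) (by omega) (by omega) (by omega)]
              cases pvScanB cs c fb' (i + 1) with
              | none => rfl
              | some j => rcases j with ⟨j, hj⟩; rfl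
    · rw [pv_loopA_end content cs s fa i (c :: rest) false false h, pv_scanB_end cs c fb i h]

-- ===== VERDICT (by name: the statement is the Claim_ definition above) =====
theorem read_json_fragment_py_spec : Claim_equal_read_json_fragment_py := by
  intro content start_index _ hpre
  unfold Spec_read_json_fragment_py
  unfold read_json_fragment_py read_json_fragment_py_alt
  obtain ⟨h0, h1⟩ := hpre
  obtain ⟨opening, hop⟩ := pv_get_some content.toList start_index h0 h1
  rw [hop]
  simp only
  rw [pv_main_agree content content.toList start_index
      ((content.toList.length : Int) - (start_index + 1)).toNat
      (2 * content.toList.length) (2 * content.toList.length) (2 * content.toList.length)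
      (start_index + 1) (if opening = '{' then '}' else ']') []
      (le_refl _) (by omega) (by omega) (by omega) (by omega)]
  cases pvScanB content.toList (if opening = '{' then '}' else ']')
      (2 * content.toList.length) (start_index + 1) with
  | none => rfl
  | some j => rcases j with ⟨j, hj⟩; rfl
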